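-- pv_equiv track=rewrite | github.com/Assyrian-Digital-Language-Consortium/transliterator | src/SyrTransliterator.py | split_ipa_text
-- ===== SOURCE A (Python) =====
-- from typing import Dict, List, Tuple
--
-- def split_ipa_text(text: str) -> List[str]:
--     """
--     Split IPA text into tokens, separating words from punctuation.
--
--     Parameters:
--         text (str): The IPA text.
--
--     Returns:
--         List[str]: A list of IPA tokens.
--     """
--     result: List[str] = []
--     word: str = ""
--     punctuations: List[str] = [
--         ",",
--         ":",
--         ";",
--         "!",
--         ".",
--         "-",
--         "<",
--         ">",
--         "?",
--         "'",
--         '"',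
--     ]
--     for char in text:
--         if char in punctuations or char.isspace():
--             if word:
--                 result.append(word)
--                 word = ""
--             result.append(char)
--         else:
--             word += char
--     if word:
--         result.append(word)
--     return result
-- ===== SOURCE B (Python) =====
-- def split_ipa_text(text: str):
--     """
--     Split IPA text into tokens, separating words from punctuation.
--
--     Scans the text by maximal runs (two-index span scan) instead of
--     maintaining a growing word buffer flushed on separators.
--     """
--     seps = {",", ":", ";", "!", ".", "-", "<", ">", "?", "'", '"'}
--
--     def is_sep(c: str) -> bool:
--         return c in seps or c.isspace()
--
--     result = []
--     i = 0
--     n = len(text)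
--     while i < n:
--         if is_sep(text[i]):
--             result.append(text[i])
--             i += 1
--         else:
--             j = i
--             while j < n and not is_sep(text[j]):
--                 j += 1
--             result.append(text[i:j])
--             i = j
--     return result
-- ===== Notes on version B (the rewrite author's own statement) =====
-- stated objective: alternative
-- what changed: B replaces A's character-by-character word buffer (flushed on each separator) with a two-index span scan over maximal non-separator runs, slicing each word out in one step.
import Mathlib
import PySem

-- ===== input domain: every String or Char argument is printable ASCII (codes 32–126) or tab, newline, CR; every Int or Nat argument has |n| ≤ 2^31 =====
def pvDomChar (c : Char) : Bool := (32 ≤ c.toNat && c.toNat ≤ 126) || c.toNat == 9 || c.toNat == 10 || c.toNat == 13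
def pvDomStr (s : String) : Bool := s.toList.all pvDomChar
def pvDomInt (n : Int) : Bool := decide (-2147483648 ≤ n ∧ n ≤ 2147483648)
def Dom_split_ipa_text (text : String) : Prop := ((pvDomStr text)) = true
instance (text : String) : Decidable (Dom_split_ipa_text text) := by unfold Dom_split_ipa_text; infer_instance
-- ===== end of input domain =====

-- B replaces A's per-character word buffer with a span scan over maximal non-separator runs (alternative decomposition, same O(n) cost).


-- ===== PORT A =====
-- "char in punctuations or char.isspace()" — shared by both Pythons verbatim
def pvPunct : List Char := [',', ':', ';', '!', '.', '-', '<', '>', '?', '\'', '"']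

def pvIsSep (c : Char) : Bool := pvPunct.contains c || PySem.Chars.isspace c

-- the for-loop: state (result, word); word as List Char (word += char ≙ word ++ [c])
def pvLoopA : List Char → List String × List Char → List String × List Char
  | [], st => st
  | c :: cs, (result, word) =>
    if pvIsSep c then
      pvLoopA cs ((if word ≠ [] then result ++ [String.ofList word] else result) ++ [String.ofList [c]], [])
    else
      pvLoopA cs (result, word ++ [c])

def split_ipa_text (text : String) : List String :=
  let (result, word) := pvLoopA text.toList ([], [])
  if word ≠ [] then result ++ [String.ofList word] else result

-- ===== PORT B =====
-- Source B's span scan: a separator char is its own token; otherwise the inner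
-- while-loop advance of j and the slice text[i:j] are takeWhile, and resuming
-- at i = j is dropWhile (exact: same run of non-separator chars).
def pvGoB : List Char → List String
  | [] => []
  | c :: cs =>
    if pvIsSep c then
      String.ofList [c] :: pvGoB cs
    else
      String.ofList (c :: cs.takeWhile (fun d => !pvIsSep d)) ::
        pvGoB (cs.dropWhile (fun d => !pvIsSep d))
termination_by cs => cs.length
decreasing_by
  · simp
  · exact Nat.lt_succ_of_le (List.length_dropWhile_le _ _)

def split_ipa_text_alt (text : String) : List String := pvGoB text.toList

-- ===== PRECONDITION & SPEC =====
def Spec_split_ipa_text (text : String) (out : List String) : Prop := out = split_ipa_text_alt text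
instance (text : String) (out : List String) : Decidable (Spec_split_ipa_text text out) := by unfold Spec_split_ipa_text; infer_instance

-- ===== CLAIM (what is proved, stated in full; the proofs are below) =====
def Claim_equal_split_ipa_text : Prop := ∀ (text : String), Dom_split_ipa_text text → Spec_split_ipa_text text (split_ipa_text text)

-- ===== LEMMAS AND PROOFS =====
-- finishing step of A (the trailing "if word: result.append(word)")
def pvFinishA (st : List String × List Char) : List String :=
  if st.2 ≠ [] then st.1 ++ [String.ofList st.2] else st.1

lemma pvLoopA_goB : ∀ (cs : List Char) (res : List String) (w : List Char),
    (∀ d ∈ w, pvIsSep d = false) →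
    pvFinishA (pvLoopA cs (res, w)) = res ++ pvGoB (w ++ cs) := by
  intro cs
  induction cs with
  | nil =>
    intro res w hw
    cases w with
    | nil => simp [pvLoopA, pvFinishA, pvGoB]
    | cons d w' =>
      have hd : pvIsSep d = false := hw d (by simp)
      have hall : ∀ x ∈ w', (fun d => !pvIsSep d) x = true := by
        intro x hx; simp [hw x (by simp [hx])]
      simp [pvLoopA, pvFinishA, pvGoB, hd,
        List.takeWhile_eq_self_iff.mpr hall, List.dropWhile_eq_nil_iff.mpr (fun x hx => hall x hx)]
  | cons c cs' ih =>
    intro res w hw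
    by_cases hc : pvIsSep c = true
    · have step : pvLoopA (c :: cs') (res, w)
          = pvLoopA cs' ((if w ≠ [] then res ++ [String.ofList w] else res) ++ [String.ofList [c]], []) := by
        simp [pvLoopA, hc]
      rw [step, ih _ [] (by simp)]
      cases w with
      | nil => simp [pvGoB, hc]
      | cons d w' =>
        have hd : pvIsSep d = false := hw d (by simp)
        have hall : ∀ x ∈ w', (fun d => !pvIsSep d) x = true := by
          intro x hx; simp [hw x (by simp [hx])]
        have htake : (w' ++ c :: cs').takeWhile (fun d => !pvIsSep d) = w' := by
          rw [List.takeWhile_append]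
          simp [List.takeWhile_eq_self_iff.mpr hall, hc]
        have hdrop : (w' ++ c :: cs').dropWhile (fun d => !pvIsSep d) = c :: cs' := by
          rw [List.dropWhile_append]
          simp [List.dropWhile_eq_nil_iff.mpr (fun x hx => hall x hx), hc]
      -- goB on (d::w') ++ c::cs' : word token mk (d::w'), then sep c, then rest
        simp [pvGoB, hd, hc, htake, hdrop]
    · have hc' : pvIsSep c = false := by simpa using hc
      have step : pvLoopA (c :: cs') (res, w) = pvLoopA cs' (res, w ++ [c]) := by
        simp [pvLoopA, hc']
      have hw' : ∀ d ∈ w ++ [c], pvIsSep d = false := by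
        intro d hd
        rcases List.mem_append.mp hd with h | h
        · exact hw d h
        · simp at h; simpa [h] using hc'
      rw [step, ih _ (w ++ [c]) hw']
      simp

-- ===== VERDICT (by name: the statement is the Claim_ definition above) =====
theorem split_ipa_text_spec : Claim_equal_split_ipa_text := by
  intro text _
  show _ = split_ipa_text_alt text
  have h := pvLoopA_goB text.toList [] [] (by simp)
  simpa [split_ipa_text, split_ipa_text_alt, pvFinishA] using h
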